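-- pv_equiv track=rewrite | github.com/marlsbarls/vrp_greedy_vns_aco | vns/src/algorithm/improved_vns.py | sort_tours
-- ===== SOURCE A (Python) =====
-- def sort_tours(Sub_tour):
--     sorted_tours = sorted(Sub_tour, key=len)
--     divider = len(sorted_tours[int(len(sorted_tours)/2)])
--     short_tours = []
--     long_tours = []
--     for tour in Sub_tour:
--         if len(tour) < divider:
--             short_tours.append(tour)
--         else:
--             long_tours.append(tour)
--     return short_tours, long_tours
-- ===== SOURCE B (Python) =====
-- def sort_tours(Sub_tour):
--     lengths = [len(t) for t in Sub_tour]
--     divider = _kth_smallest(lengths, len(lengths) // 2)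
--     short_tours = [t for t in Sub_tour if len(t) < divider]
--     long_tours = [t for t in Sub_tour if len(t) >= divider]
--     return short_tours, long_tours
--
--
-- def _kth_smallest(xs, k):
--     # iterative quickselect (middle-element pivot): k-th smallest of xs, 0-based
--     while True:
--         p = xs[len(xs) // 2]
--         lo = [x for x in xs if x < p]
--         if k < len(lo):
--             xs = lo
--             continue
--         eq_len = len([x for x in xs if x == p])
--         if k < len(lo) + eq_len:
--             return p
--         k -= len(lo) + eq_len
--         xs = [x for x in xs if x > p]
-- ===== Notes on version B (the rewrite author's own statement) =====
-- stated objective: alternative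
-- what changed: replaces the full sort of all tours by an iterative quickselect that finds only the median tour length, then partitions with two filters
import Mathlib
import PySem

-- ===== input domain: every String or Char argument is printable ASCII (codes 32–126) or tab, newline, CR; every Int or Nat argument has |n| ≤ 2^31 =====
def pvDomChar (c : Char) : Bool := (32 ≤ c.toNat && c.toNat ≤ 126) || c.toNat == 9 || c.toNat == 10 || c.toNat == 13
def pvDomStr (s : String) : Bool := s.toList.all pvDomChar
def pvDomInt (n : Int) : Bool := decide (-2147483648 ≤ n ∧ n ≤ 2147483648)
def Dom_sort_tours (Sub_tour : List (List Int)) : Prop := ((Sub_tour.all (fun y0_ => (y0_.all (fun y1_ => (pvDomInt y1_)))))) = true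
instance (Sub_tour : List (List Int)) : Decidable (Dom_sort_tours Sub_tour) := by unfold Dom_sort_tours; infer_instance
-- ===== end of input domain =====

-- B replaces A's full sort by an iterative quickselect that finds only the median tour length,
-- then partitions with two filters: an alternative algorithm (not claimed faster).


-- ===== PORT A =====
def sort_tours (Sub_tour : List (List Int)) : List (List Int) × List (List Int) :=
  let sorted_tours := PySem.List.sorted Sub_tour (fun t => (t.length : Int)) false
  match PySem.List.pyGet? sorted_tours (PySem.Int.floordiv (sorted_tours.length : Int) 2) with
  | none => ([], [])   -- Python raises IndexError here (empty input only); excluded by Pre_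
  | some mid =>
    let divider : Int := (mid.length : Int)
    Sub_tour.foldl
      (fun (acc : List (List Int) × List (List Int)) tour =>
        if (tour.length : Int) < divider then (acc.1 ++ [tour], acc.2)
        else (acc.1, acc.2 ++ [tour]))
      ([], [])

-- ===== PORT B =====
-- Source B's iterative quickselect (middle-element pivot) as tail recursion:
-- k-th smallest element of xs, 0-based
def kthSmallest : List Int → Nat → Int
  | [], _ => 0   -- Python raises IndexError here (empty input only); excluded by Pre_
  | x :: rest, k =>
    let xs := x :: rest
    let p := xs.getD (xs.length / 2) 0
    let lo := xs.filter (fun y => decide (y < p))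
    if k < lo.length then kthSmallest lo k
    else
      let eqLen := (xs.filter (fun y => y == p)).length
      if k < lo.length + eqLen then p
      else kthSmallest (xs.filter (fun y => decide (p < y))) (k - (lo.length + eqLen))
termination_by xs _ => xs.length
decreasing_by
  · refine List.length_filter_lt_length_iff_exists.mpr ⟨(x :: rest).getD ((x :: rest).length / 2) 0, ?_, by simp⟩
    rw [List.getD_eq_getElem _ 0 (by simp; omega)]; exact List.getElem_mem _
  · refine List.length_filter_lt_length_iff_exists.mpr ⟨(x :: rest).getD ((x :: rest).length / 2) 0, ?_, by simp⟩
    rw [List.getD_eq_getElem _ 0 (by simp; omega)]; exact List.getElem_mem _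

def sort_tours_alt (Sub_tour : List (List Int)) : List (List Int) × List (List Int) :=
  let lengths := Sub_tour.map (fun t => (t.length : Int))
  let divider := kthSmallest lengths (lengths.length / 2)
  (Sub_tour.filter (fun t => decide ((t.length : Int) < divider)),
   Sub_tour.filter (fun t => decide (divider ≤ (t.length : Int))))

-- ===== PRECONDITION & SPEC =====
-- Pre_ excludes only the empty list, on which Python A raises IndexError.
def Pre_sort_tours (Sub_tour : List (List Int)) : Prop := Sub_tour ≠ []
instance (Sub_tour : List (List Int)) : Decidable (Pre_sort_tours Sub_tour) := by unfold Pre_sort_tours; infer_instance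
def pvWitness_sort_tours : List (List Int) := [[1], [1, 2], [1, 2, 3]]

def Spec_sort_tours (Sub_tour : List (List Int)) (out : List (List Int) × List (List Int)) : Prop := out = sort_tours_alt Sub_tour
instance (Sub_tour : List (List Int)) (out : List (List Int) × List (List Int)) : Decidable (Spec_sort_tours Sub_tour out) := by unfold Spec_sort_tours; infer_instance

-- ===== CLAIM (what is proved, stated in full; the proofs are below) =====
def Claim_equal_sort_tours : Prop := ∀ (Sub_tour : List (List Int)), Dom_sort_tours Sub_tour → Pre_sort_tours Sub_tour → Spec_sort_tours Sub_tour (sort_tours Sub_tour)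

-- ===== LEMMAS AND PROOFS =====

-- A's partition loop is the pair of filters.
theorem foldl_partition (divider : Int) (xs : List (List Int)) (a b : List (List Int)) :
    xs.foldl
      (fun (acc : List (List Int) × List (List Int)) tour =>
        if (tour.length : Int) < divider then (acc.1 ++ [tour], acc.2)
        else (acc.1, acc.2 ++ [tour]))
      (a, b)
    = (a ++ xs.filter (fun t => decide ((t.length : Int) < divider)),
       b ++ xs.filter (fun t => decide (divider ≤ (t.length : Int)))) := by
  induction xs generalizing a b with
  | nil => simp
  | cons x xs ih =>
    by_cases h : (x.length : Int) < divider
    · simp [List.foldl_cons, h, ih, not_le.mpr h]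
    · simp [List.foldl_cons, h, ih, not_lt.mp h]

-- the three-way partition of xs around p is a permutation of xs
theorem perm_three_filter (xs : List Int) (p : Int) :
    (xs.filter (fun y => decide (y < p)) ++ xs.filter (fun y => y == p)
      ++ xs.filter (fun y => decide (p < y))).Perm xs := by
  rw [List.perm_iff_count]
  intro a
  have hz : ∀ q : Int → Bool, q a = false → (xs.filter q).count a = 0 := by
    intro q hq
    exact List.count_eq_zero.mpr (fun hmem => by simp [List.mem_filter, hq] at hmem)
  simp only [List.count_append]
  rcases lt_trichotomy a p with h | h | h
  · rw [List.count_filter (by simpa using h),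
      hz _ (by simp; omega), hz _ (by simp; omega)]
    omega
  · rw [hz _ (by simp; omega), List.count_filter (by simpa using h),
      hz _ (by simp; omega)]
    omega
  · rw [hz _ (by simp; omega), hz _ (by simp; omega),
      List.count_filter (by simpa using h)]
    omega

-- sorted(xs) decomposes along the three-way partition around any pivot p
theorem sorted_decomp (xs : List Int) (p : Int) :
    PySem.List.sorted xs (fun y => y) false
      = PySem.List.sorted (xs.filter (fun y => decide (y < p))) (fun y => y) false
        ++ xs.filter (fun y => y == p)
        ++ PySem.List.sorted (xs.filter (fun y => decide (p < y))) (fun y => y) false := by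
  apply PySem.List.sorted_id_eq_of_perm_of_pairwise
  · exact (((PySem.List.sorted_perm _ _ false).append (List.Perm.refl _)).append
      (PySem.List.sorted_perm _ _ false)).trans (perm_three_filter xs p)
  · have hlo : ∀ a ∈ PySem.List.sorted (xs.filter (fun y => decide (y < p))) (fun y => y) false, a < p := by
      intro a ha
      have := (PySem.List.mem_sorted _ _ _ _).mp ha
      simpa using (List.mem_filter.mp this).2
    have heq : ∀ a ∈ xs.filter (fun y => y == p), a = p := by
      intro a ha
      simpa using (List.mem_filter.mp ha).2
    have hhi : ∀ a ∈ PySem.List.sorted (xs.filter (fun y => decide (p < y))) (fun y => y) false, p < a := by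
      intro a ha
      have := (PySem.List.mem_sorted _ _ _ _).mp ha
      simpa using (List.mem_filter.mp this).2
    rw [List.pairwise_append, List.pairwise_append]
    refine ⟨⟨PySem.List.sorted_pairwise _ _, ?_, ?_⟩, PySem.List.sorted_pairwise _ _, ?_⟩
    · exact List.pairwise_of_forall_mem_list (fun a ha b hb => le_of_eq ((heq a ha).trans (heq b hb).symm))
    · intro a ha b hb
      exact le_of_lt ((heq b hb) ▸ hlo a ha)
    · intro a ha b hb
      rcases List.mem_append.mp ha with ha | ha
      · exact le_of_lt ((hlo a ha).trans (hhi b hb))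
      · exact le_of_lt ((heq a ha) ▸ hhi b hb)

-- quickselect computes the k-th element of sorted(xs)
theorem kthSmallest_eq_sorted (xs : List Int) (k : Nat) (hk : k < xs.length) :
    kthSmallest xs k = (PySem.List.sorted xs (fun y => y) false).getD k 0 := by
  obtain ⟨n, hn⟩ : ∃ n, xs.length = n := ⟨_, rfl⟩
  induction n using Nat.strong_induction_on generalizing xs k with
  | _ n ih =>
  match xs, hk with
  | x :: rest, hk =>
    subst hn
    set XS := x :: rest with hXS
    set p := XS.getD (XS.length / 2) 0 with hp
    have hpmem : p ∈ XS := by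
      rw [hp, List.getD_eq_getElem _ 0 (by simp [hXS]; omega)]
      exact List.getElem_mem _
    set lo := XS.filter (fun y => decide (y < p)) with hlo
    set eqs := XS.filter (fun y => y == p) with heqs
    set hi := XS.filter (fun y => decide (p < y)) with hhi
    have hlolt : lo.length < XS.length :=
      List.length_filter_lt_length_iff_exists.mpr ⟨p, hpmem, by simp⟩
    have hhilt : hi.length < XS.length :=
      List.length_filter_lt_length_iff_exists.mpr ⟨p, hpmem, by simp⟩
    have hsum : lo.length + eqs.length + hi.length = XS.length := by
      have h3 := (perm_three_filter XS p).length_eq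
      rw [← hlo, ← heqs, ← hhi] at h3
      simp only [List.length_append] at h3
      omega
    have hdec := sorted_decomp XS p
    rw [← hlo, ← heqs, ← hhi] at hdec
    rw [kthSmallest]
    simp only [← hXS, ← hp, ← hlo, ← heqs, ← hhi]
    by_cases h1 : k < lo.length
    · rw [if_pos h1, hdec,
        List.getD_append _ _ _ _ (by simp [PySem.List.length_sorted]; omega),
        List.getD_append _ _ _ _ (by simp [PySem.List.length_sorted]; omega)]
      exact ih lo.length (by omega) lo k h1 rfl
    · rw [if_neg h1]
      by_cases h2 : k < lo.length + eqs.length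
      · rw [if_pos h2, hdec,
          List.getD_append _ _ _ _ (by simp [PySem.List.length_sorted]; omega),
          List.getD_append_right _ _ _ _ (by simp [PySem.List.length_sorted]; omega)]
        have hidx : k - (PySem.List.sorted lo (fun y => y) false).length < eqs.length := by
          simp [PySem.List.length_sorted]; omega
        rw [List.getD_eq_getElem _ 0 hidx]
        have hallp : ∀ a ∈ eqs, a = p := by
          intro a ha
          rw [heqs] at ha
          simpa using (List.mem_filter.mp ha).2
        exact (hallp _ (List.getElem_mem hidx)).symm
      · rw [if_neg h2, hdec,
          List.getD_append_right _ _ _ _ (by simp [PySem.List.length_sorted]; omega)]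
        have hlen : ((PySem.List.sorted lo (fun y => y) false) ++ eqs).length
            = lo.length + eqs.length := by
          simp [PySem.List.length_sorted]
        rw [hlen]
        exact ih hi.length (by omega) hi (k - (lo.length + eqs.length)) (by omega) rfl

-- mapping len over sorted-by-len is sorted of the lens (stability not needed: only keys survive)
theorem map_len_sorted (xs : List (List Int)) :
    (PySem.List.sorted xs (fun t => (t.length : Int)) false).map (fun t => (t.length : Int))
      = PySem.List.sorted (xs.map (fun t => (t.length : Int))) (fun y => y) false := by
  exact (PySem.List.sorted_id_eq_of_perm_of_pairwise _ _
    ((PySem.List.sorted_perm xs _ false).map _)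
    (PySem.List.sorted_map_key_pairwise xs _)).symm

-- ===== VERDICT (by name: the statement is the Claim_ definition above) =====
theorem sort_tours_spec : Claim_equal_sort_tours := by
  intro Sub_tour _ hpre
  unfold Spec_sort_tours
  have hn : 0 < Sub_tour.length := List.length_pos_iff.mpr hpre
  have hlen : (PySem.List.sorted Sub_tour (fun t => (t.length : Int)) false).length
      = Sub_tour.length := PySem.List.length_sorted _ _ _
  -- A's median lookup succeeds and yields the middle element of the sorted list
  have hget : PySem.List.pyGet? (PySem.List.sorted Sub_tour (fun t => (t.length : Int)) false)
      (PySem.Int.floordiv (((PySem.List.sorted Sub_tour (fun t => (t.length : Int)) false).length : Int)) 2)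
      = some ((PySem.List.sorted Sub_tour (fun t => (t.length : Int)) false).getD (Sub_tour.length / 2) []) := by
    rw [hlen]
    rw [(by exact_mod_cast PySem.Int.floordiv_natCast Sub_tour.length 2 :
      PySem.Int.floordiv ((Sub_tour.length : Int)) 2 = ((Sub_tour.length / 2 : Nat) : Int))]
    rw [PySem.List.pyGet?_natCast]
    rw [List.getElem?_eq_getElem (by omega), List.getD_eq_getElem _ _ (by omega)]
  -- the two dividers agree
  have hdiv : kthSmallest (Sub_tour.map (fun t => (t.length : Int)))
        ((Sub_tour.map (fun t => (t.length : Int))).length / 2)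
      = (((PySem.List.sorted Sub_tour (fun t => (t.length : Int)) false).getD (Sub_tour.length / 2) []).length : Int) := by
    rw [kthSmallest_eq_sorted _ _ (by simp; omega), ← map_len_sorted]
    rw [List.length_map]
    rw [List.getD_eq_getElem _ _ (by simp [hlen]; omega),
      List.getD_eq_getElem _ _ (by omega), List.getElem_map]
  simp only [sort_tours, sort_tours_alt, hget, foldl_partition, List.nil_append, hdiv]
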